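-- pv_equiv track=rewrite | github.com/samsa651/Chem_project_group19 | project.py | create_matrix_equation
-- ===== SOURCE A (Python) =====
-- def create_matrix_equation(lft_half_dt, rgt_half_dt, elements,eqtion):
--
--     lft_half_len = len(lft_half_dt)
--     rght_half_len = len(rgt_half_dt)
--
--     whole_len = len(eqtion)
--
--     m =[[0 for _ in range(whole_len)] for _ in range(len(elements))]
--     for i in range(len(elements)):
--         for j in range(whole_len):
--             if elements[i] in eqtion[j]:
--                 if j < lft_half_len or j == whole_len-1:
--                     m[i][j] = eqtion[j][elements[i]]
--                 else:
--                     m[i][j] = -1*eqtion[j][elements[i]]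
--
--     return m
-- ===== SOURCE B (Python) =====
-- def create_matrix_equation(lft_half_dt, rgt_half_dt, elements, eqtion):
--     # sparse fill: index rows by element name, then walk each column's dict items once
--     rows = {}
--     for i, name in enumerate(elements):
--         rows[name] = rows.get(name, []) + [i]
--     lft_half_len = len(lft_half_dt)
--     whole_len = len(eqtion)
--     m = [[0] * whole_len for _ in range(len(elements))]
--     for j, d in enumerate(eqtion):
--         sign = 1 if j < lft_half_len or j == whole_len - 1 else -1
--         for name, c in d.items():
--             for i in rows.get(name, []):
--                 m[i][j] = sign * c
--     return m
-- ===== Notes on version B (the rewrite author's own statement) =====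
-- stated objective: faster
-- what changed: B replaces A's dense row-by-row membership scan over all (element, column) pairs with a precomputed name-to-row-indices map and a sparse column-major fill driven by each column dict's items.
import Mathlib
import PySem

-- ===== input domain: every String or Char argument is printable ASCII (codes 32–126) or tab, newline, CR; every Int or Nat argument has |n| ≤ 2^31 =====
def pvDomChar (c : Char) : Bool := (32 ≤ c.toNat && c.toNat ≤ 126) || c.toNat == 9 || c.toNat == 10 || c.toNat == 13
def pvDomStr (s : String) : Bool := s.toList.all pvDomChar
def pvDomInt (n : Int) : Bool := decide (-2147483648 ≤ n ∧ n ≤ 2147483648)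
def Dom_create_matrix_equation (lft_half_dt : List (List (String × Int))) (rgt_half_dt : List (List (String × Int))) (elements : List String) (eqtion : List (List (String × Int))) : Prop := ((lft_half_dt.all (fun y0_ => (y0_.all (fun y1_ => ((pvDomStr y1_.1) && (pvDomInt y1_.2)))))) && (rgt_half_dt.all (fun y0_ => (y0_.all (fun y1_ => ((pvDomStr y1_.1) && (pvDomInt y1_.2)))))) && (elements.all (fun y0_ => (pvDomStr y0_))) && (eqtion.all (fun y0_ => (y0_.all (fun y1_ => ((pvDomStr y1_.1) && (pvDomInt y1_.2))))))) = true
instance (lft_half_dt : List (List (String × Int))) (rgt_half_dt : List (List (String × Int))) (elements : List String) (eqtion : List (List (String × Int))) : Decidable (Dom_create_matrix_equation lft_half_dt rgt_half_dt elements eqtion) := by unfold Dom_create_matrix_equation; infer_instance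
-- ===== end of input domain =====

-- B replaces A's dense elements×columns membership scan by a name→row-indices map and a
-- sparse, dict-item-driven column fill (objective: faster; measured faster in a timing run).

-- ===== PORT A =====
-- each dict is an association list; `elements[i] in eqtion[j]` + the lookup `eqtion[j][elements[i]]`
-- are ported together as one first-match get? (exact: Python dict membership+indexing).
-- i, j come from range(len(..)) so getD defaults are never used.
def create_matrix_equation (lft_half_dt : List (List (String × Int))) (rgt_half_dt : List (List (String × Int))) (elements : List String) (eqtion : List (List (String × Int))) : List (List Int) :=
  let lft_half_len := lft_half_dt.length
  let whole_len := eqtion.length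
  let m0 : List (List Int) := (List.range elements.length).map (fun _ => (List.range whole_len).map (fun _ => (0 : Int)))
  (List.range elements.length).foldl (fun m i =>
    (List.range whole_len).foldl (fun m j =>
      match (PySem.Dict.mk (eqtion.getD j [])).get? (elements.getD i "") with
      | some c => m.modify i (fun row => row.set j (if j < lft_half_len ∨ j = whole_len - 1 then c else -1 * c))
      | none => m) m) m0

-- ===== PORT B =====
-- rows.get(name, []) + [i]  →  insert name (getD name [] ++ [i]); enumerate indices are ≥ 0,
-- so .toNat is exact where Source B indexes m with them.
def create_matrix_equation_alt (lft_half_dt : List (List (String × Int))) (rgt_half_dt : List (List (String × Int))) (elements : List String) (eqtion : List (List (String × Int))) : List (List Int) :=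
  let rows : PySem.Dict String (List Int) :=
    (PySem.List.enumerate elements 0).foldl (fun d p => d.insert p.2 (d.getD p.2 [] ++ [p.1])) PySem.Dict.empty
  let lft_half_len := lft_half_dt.length
  let whole_len := eqtion.length
  let m0 : List (List Int) := (List.range elements.length).map (fun _ => List.replicate whole_len (0 : Int))
  (PySem.List.enumerate eqtion 0).foldl (fun m p =>
    let sign : Int := if p.1 < (lft_half_len : Int) ∨ p.1 = (whole_len : Int) - 1 then 1 else -1
    p.2.foldl (fun m q =>
      (rows.getD q.1 []).foldl (fun m i =>
        m.modify i.toNat (fun row => row.set p.1.toNat (sign * q.2))) m) m) m0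

-- ===== PRECONDITION & SPEC =====
-- Pre_ excludes association lists encoding an eqtion dict with duplicate keys: a Python dict
-- cannot have duplicate keys, and on such encodings A's first-match lookup vs B's last-write
-- order are both accidental readings of an unrepresentable input.
def Pre_create_matrix_equation (lft_half_dt : List (List (String × Int))) (rgt_half_dt : List (List (String × Int))) (elements : List String) (eqtion : List (List (String × Int))) : Prop :=
  ∀ d ∈ eqtion, (d.map Prod.fst).Nodup
instance (lft_half_dt : List (List (String × Int))) (rgt_half_dt : List (List (String × Int))) (elements : List String) (eqtion : List (List (String × Int))) : Decidable (Pre_create_matrix_equation lft_half_dt rgt_half_dt elements eqtion) := by unfold Pre_create_matrix_equation; infer_instance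

def pvWitness_create_matrix_equation : (List (List (String × Int))) × (List (List (String × Int))) × List String × (List (List (String × Int))) :=
  ([[("H", 2), ("O", 1)]], [[("H", 2), ("O", 1)]], ["H", "O"], [[("H", 2), ("O", 1)], [("H", 2), ("O", 1)]])

def Spec_create_matrix_equation (lft_half_dt : List (List (String × Int))) (rgt_half_dt : List (List (String × Int))) (elements : List String) (eqtion : List (List (String × Int))) (out : List (List Int)) : Prop := out = create_matrix_equation_alt lft_half_dt rgt_half_dt elements eqtion
instance (lft_half_dt : List (List (String × Int))) (rgt_half_dt : List (List (String × Int))) (elements : List String) (eqtion : List (List (String × Int))) (out : List (List Int)) : Decidable (Spec_create_matrix_equation lft_half_dt rgt_half_dt elements eqtion out) := by unfold Spec_create_matrix_equation; infer_instance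

-- ===== CLAIM (what is proved, stated in full; the proofs are below) =====
def Claim_equal_create_matrix_equation : Prop := ∀ (lft_half_dt : List (List (String × Int))) (rgt_half_dt : List (List (String × Int))) (elements : List String) (eqtion : List (List (String × Int))), Dom_create_matrix_equation lft_half_dt rgt_half_dt elements eqtion → Pre_create_matrix_equation lft_half_dt rgt_half_dt elements eqtion → Spec_create_matrix_equation lft_half_dt rgt_half_dt elements eqtion (create_matrix_equation lft_half_dt rgt_half_dt elements eqtion)

-- ===== LEMMAS AND PROOFS =====

-- the common specification matrix: entry (i, j) is A's signed coefficient of elements[i] in eqtion[j]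
def pvCell (lft whole : Nat) (eqtion : List (List (String × Int))) (e : String) (j : Nat) : Int :=
  match (PySem.Dict.mk (eqtion.getD j [])).get? e with
  | some c => if j < lft ∨ j = whole - 1 then c else -1 * c
  | none => 0

def pvSpecM (lft : Nat) (elements : List String) (eqtion : List (List (String × Int))) : List (List Int) :=
  elements.map (fun e => (List.range eqtion.length).map (pvCell lft eqtion.length eqtion e))

theorem pv_modify_modify {α : Type} (m : List α) (i : Nat) (f g : α → α) :
    (m.modify i f).modify i g = m.modify i (fun x => g (f x)) := by
  apply List.ext_getElem?
  intro k
  simp [List.getElem?_modify]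
  by_cases h : i = k <;> simp [h] <;> cases m[k]? <;> rfl

theorem pv_modify_id {α : Type} (m : List α) (i : Nat) :
    m.modify i (fun x => x) = m := by
  apply List.ext_getElem?
  intro k
  simp [List.getElem?_modify]

-- ---------- A-side ----------

def pvStepA (lft whole : Nat) (eqtion : List (List (String × Int))) (e : String) (row : List Int) (j : Nat) : List Int :=
  match (PySem.Dict.mk (eqtion.getD j [])).get? e with
  | some c => row.set j (if j < lft ∨ j = whole - 1 then c else -1 * c)
  | none => row

theorem pv_foldl_modify {β : Type} (l : List β) (step : List Int → β → List Int) (i : Nat) :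
    ∀ (m : List (List Int)), l.foldl (fun m j => m.modify i (fun row => step row j)) m
      = m.modify i (fun row => l.foldl step row) := by
  induction l with
  | nil => intro m; simp [pv_modify_id]
  | cons b l ih =>
      intro m
      simp only [List.foldl_cons]
      rw [ih, pv_modify_modify]

theorem pv_inner_eq (lft whole : Nat) (eqtion : List (List (String × Int))) (e : String) (i : Nat) (m : List (List Int)) :
    (List.range whole).foldl (fun m j =>
      match (PySem.Dict.mk (eqtion.getD j [])).get? e with
      | some c => m.modify i (fun row => row.set j (if j < lft ∨ j = whole - 1 then c else -1 * c))
      | none => m) m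
    = m.modify i (fun row => (List.range whole).foldl (pvStepA lft whole eqtion e) row) := by
  rw [← pv_foldl_modify]
  congr 1
  funext m j
  cases hG : (PySem.Dict.mk (eqtion.getD j [])).get? e with
  | some c => simp only [pvStepA, hG]
  | none =>
      simp only [pvStepA, hG]
      exact (pv_modify_id m i).symm

theorem pv_outer_getElem (F : Nat → List Int → List Int) (t : Nat) (m : List (List Int)) (k : Nat) :
    ((List.range t).foldl (fun m i => m.modify i (F i)) m)[k]? = if k < t then (m[k]?).map (F k) else m[k]? := by
  induction t with
  | zero => simp
  | succ t ih =>
      rw [List.range_succ, List.foldl_append]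
      simp only [List.foldl_cons, List.foldl_nil]
      rw [List.getElem?_modify, ih]
      rcases Nat.lt_trichotomy k t with h | h | h
      · simp [h, Nat.lt_succ_of_lt h, Nat.ne_of_gt h]
      · subst h
        simp
      · have h1 : ¬ k < t := by omega
        have h2 : ¬ k < t + 1 := by omega
        have h3 : t ≠ k := by omega
        simp [h1, h2, h3]

theorem pv_rowfoldA_length (lft whole : Nat) (eqtion : List (List (String × Int))) (e : String) :
    ∀ (l : List Nat) (row : List Int), (l.foldl (pvStepA lft whole eqtion e) row).length = row.length := by
  intro l
  induction l with
  | nil => intro row; rfl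
  | cons j l ih =>
      intro row
      simp only [List.foldl_cons]
      rw [ih]
      cases hG : (PySem.Dict.mk (eqtion.getD j [])).get? e with
      | some c => simp only [pvStepA, hG, List.length_set]
      | none => simp only [pvStepA, hG]

theorem pv_zeroRowA_getElem (whole k : Nat) :
    ((List.range whole).map (fun _ => (0 : Int)))[k]? = if k < whole then some 0 else none := by
  by_cases h : k < whole <;> simp [List.getElem?_map, List.getElem?_range, h]

theorem pv_rowfillA (lft whole : Nat) (eqtion : List (List (String × Int))) (e : String)
    (row : List Int) (hlenr : row.length = whole)
    (hrow : ∀ k, row[k]? = if k < whole then some 0 else none) :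
    ∀ (t : Nat), t ≤ whole → ∀ (k : Nat),
      ((List.range t).foldl (pvStepA lft whole eqtion e) row)[k]?
      = if k < t then some (pvCell lft whole eqtion e k) else row[k]? := by
  intro t
  induction t with
  | zero => intro _ k; simp
  | succ t ih =>
      intro ht k
      rw [List.range_succ, List.foldl_append]
      simp only [List.foldl_cons, List.foldl_nil]
      have hlen : ((List.range t).foldl (pvStepA lft whole eqtion e) row).length = whole := by
        rw [pv_rowfoldA_length]; exact hlenr
      have htw : t < whole := ht
      cases hG : (PySem.Dict.mk (eqtion.getD t [])).get? e with
      | some c =>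
          simp only [pvStepA, hG]
          rw [List.getElem?_set]
          rcases Nat.lt_trichotomy k t with h | h | h
          · rw [if_neg (by omega : ¬ t = k), ih (by omega) k, if_pos h, if_pos (by omega : k < t + 1)]
          · subst h
            rw [if_pos rfl, if_pos (by rw [hlen]; exact htw), if_pos (by omega : k < k + 1)]
            simp only [pvCell, hG]
          · rw [if_neg (by omega : ¬ t = k), ih (by omega) k,
              if_neg (by omega : ¬ k < t), if_neg (by omega : ¬ k < t + 1)]
      | none =>
          simp only [pvStepA, hG]
          rw [ih (by omega) k]
          rcases Nat.lt_trichotomy k t with h | h | h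
          · rw [if_pos h, if_pos (by omega : k < t + 1)]
          · subst h
            rw [if_neg (by omega : ¬ k < k), if_pos (by omega : k < k + 1)]
            have : row[k]? = some 0 := by rw [hrow k]; exact if_pos htw
            rw [this]
            simp only [pvCell, hG]
          · rw [if_neg (by omega : ¬ k < t), if_neg (by omega : ¬ k < t + 1)]

theorem pv_rowA_eq (lft whole : Nat) (eqtion : List (List (String × Int))) (e : String)
    (row : List Int) (hlenr : row.length = whole)
    (hrow : ∀ k, row[k]? = if k < whole then some 0 else none) :
    (List.range whole).foldl (pvStepA lft whole eqtion e) row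
    = (List.range whole).map (pvCell lft whole eqtion e) := by
  apply List.ext_getElem?
  intro k
  rw [pv_rowfillA lft whole eqtion e row hlenr hrow whole le_rfl k, hrow k]
  by_cases h : k < whole <;> simp [List.getElem?_map, List.getElem?_range, h]

theorem pv_A_eq_spec (lft_half_dt rgt_half_dt : List (List (String × Int))) (elements : List String) (eqtion : List (List (String × Int))) :
    create_matrix_equation lft_half_dt rgt_half_dt elements eqtion
    = pvSpecM lft_half_dt.length elements eqtion := by
  have hA : create_matrix_equation lft_half_dt rgt_half_dt elements eqtion
      = (List.range elements.length).foldl (fun m i =>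
          (List.range eqtion.length).foldl (fun m j =>
            match (PySem.Dict.mk (eqtion.getD j [])).get? (elements.getD i "") with
            | some c => m.modify i (fun row => row.set j (if j < lft_half_dt.length ∨ j = eqtion.length - 1 then c else -1 * c))
            | none => m) m)
          ((List.range elements.length).map (fun _ => (List.range eqtion.length).map (fun _ => (0 : Int)))) := rfl
  rw [hA]
  have hstep : (fun (m : List (List Int)) (i : Nat) =>
      (List.range eqtion.length).foldl (fun m j =>
        match (PySem.Dict.mk (eqtion.getD j [])).get? (elements.getD i "") with
        | some c => m.modify i (fun row => row.set j (if j < lft_half_dt.length ∨ j = eqtion.length - 1 then c else -1 * c))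
        | none => m) m)
      = (fun (m : List (List Int)) (i : Nat) =>
          m.modify i (fun row => (List.range eqtion.length).foldl (pvStepA lft_half_dt.length eqtion.length eqtion (elements.getD i "")) row)) := by
    funext m i
    exact pv_inner_eq lft_half_dt.length eqtion.length eqtion (elements.getD i "") i m
  rw [hstep]
  apply List.ext_getElem?
  intro k
  rw [pv_outer_getElem]
  by_cases h : k < elements.length
  · have he : elements[k]? = some elements[k] := List.getElem?_eq_getElem h
    have hgd : elements.getD k "" = elements[k] := by
      simp [List.getD, he]
    rw [if_pos h]
    have hm0 : ((List.range elements.length).map (fun _ => (List.range eqtion.length).map (fun _ => (0 : Int))))[k]?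
        = some ((List.range eqtion.length).map (fun _ => (0 : Int))) := by
      simp [List.getElem?_map, List.getElem?_range, h]
    rw [hm0]
    simp only [Option.map_some]
    rw [pv_rowA_eq lft_half_dt.length eqtion.length eqtion (elements.getD k "") _ (by simp) (pv_zeroRowA_getElem eqtion.length)]
    simp [pvSpecM, List.getElem?_map, he, hgd]
  · rw [if_neg h]
    have h1 : ((List.range elements.length).map (fun _ => (List.range eqtion.length).map (fun _ => (0 : Int))))[k]? = none := by
      simp [List.getElem?_map, List.getElem?_range, h]
    have h2 : elements[k]? = none := by
      rw [List.getElem?_eq_none_iff]; omega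
    rw [h1]
    simp [pvSpecM, List.getElem?_map, h2]

-- ---------- B-side ----------

def pvRows (elements : List String) : PySem.Dict String (List Int) :=
  (PySem.List.enumerate elements 0).foldl (fun d p => d.insert p.2 (d.getD p.2 [] ++ [p.1])) PySem.Dict.empty

theorem pv_rows_getD (l : List (Int × String)) :
    ∀ (d : PySem.Dict String (List Int)) (name : String),
      (l.foldl (fun d p => d.insert p.2 (d.getD p.2 [] ++ [p.1])) d).getD name []
      = d.getD name [] ++ (l.filter (fun p => p.2 == name)).map Prod.fst := by
  induction l with
  | nil => intro d name; simp
  | cons p l ih =>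
      intro d name
      simp only [List.foldl_cons]
      rw [ih]
      rw [PySem.Dict.getD_insert]
      by_cases h : p.2 = name
      · simp [h, List.filter_cons]
      · have h' : ¬ (name = p.2) := fun hh => h hh.symm
        simp [h, h', List.filter_cons]

theorem pv_rows_mem (elements : List String) (name : String) (p : Nat) :
    (∃ i ∈ (pvRows elements).getD name [], i.toNat = p) ↔ elements[p]? = some name := by
  rw [pvRows, pv_rows_getD]
  simp only [PySem.Dict.getD_empty, List.nil_append, List.mem_map, List.mem_filter]
  constructor
  · rintro ⟨i, ⟨pr, ⟨hpr, hname⟩, hfst⟩, htn⟩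
    rcases (PySem.List.mem_enumerate_iff elements 0 pr).mp hpr with ⟨k, hk, rfl⟩
    simp only [beq_iff_eq] at hname
    have hik : i = (k : Int) := by rw [← hfst]; simp
    have hp : p = k := by rw [← htn, hik]; simp
    rw [hp, List.getElem?_eq_getElem hk, hname]
  · intro he
    rcases List.getElem?_eq_some_iff.mp he with ⟨hp, hval⟩
    refine ⟨(p : Int), ⟨⟨((0 : Int) + p, elements[p]), ⟨?_, ?_⟩, ?_⟩, ?_⟩⟩
    · exact (PySem.List.mem_enumerate_iff elements 0 _).mpr ⟨p, hp, rfl⟩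
    · simp [hval]
    · simp
    · simp

theorem pv_ixsfold (ixs : List Int) (f : List Int → List Int) (hf : ∀ r, f (f r) = f r) :
    ∀ (m : List (List Int)) (p : Nat),
      (ixs.foldl (fun m i => m.modify i.toNat f) m)[p]?
      = if (∃ i ∈ ixs, i.toNat = p) then (m[p]?).map f else m[p]? := by
  induction ixs with
  | nil => intro m p; simp
  | cons i ixs ih =>
      intro m p
      simp only [List.foldl_cons]
      rw [ih, List.getElem?_modify]
      by_cases h1 : i.toNat = p <;> by_cases h2 : ∃ j ∈ ixs, j.toNat = p
      · have hc : ∃ j ∈ (i :: ixs), j.toNat = p := ⟨i, List.mem_cons_self .., h1⟩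
        simp only [h2, if_true, hc, if_true, h1, Option.map_map]
        cases m[p]? with
        | none => rfl
        | some r => simp [Function.comp, hf]
      · have hc : ∃ j ∈ (i :: ixs), j.toNat = p := ⟨i, List.mem_cons_self .., h1⟩
        simp only [h2, if_false, hc, if_true, h1]
        cases m[p]? <;> simp
      · have hc : ∃ j ∈ (i :: ixs), j.toNat = p := by
          rcases h2 with ⟨j, hj, hjp⟩
          exact ⟨j, List.mem_cons_of_mem _ hj, hjp⟩
        simp only [h2, if_true, hc, if_true]
        cases m[p]? <;> simp [h1]
      · have hc : ¬ ∃ j ∈ (i :: ixs), j.toNat = p := by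
          rintro ⟨j, hj, hjp⟩
          rcases List.mem_cons.mp hj with rfl | hj'
          · exact h1 hjp
          · exact h2 ⟨j, hj', hjp⟩
        simp only [h2, if_false, hc, if_false]
        cases m[p]? <;> simp [h1]

theorem pv_get?_mk_none (d : List (String × Int)) (e : String) (he : e ∉ d.map Prod.fst) :
    (PySem.Dict.mk d).get? e = none := by
  induction d with
  | nil => rfl
  | cons q d ih =>
      simp only [List.map_cons, List.mem_cons] at he
      push_neg at he
      rw [PySem.Dict.get?_mk_cons]
      have hne : (q.1 == e) = false := by
        simp only [beq_eq_false_iff_ne, ne_eq]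
        exact fun hh => he.1 hh.symm
      simp only [hne, Bool.false_eq_true, if_false]
      exact ih he.2

theorem pv_colfold_none (elements : List String) (jn : Nat) (s : Int) (p : Nat)
    (he : elements[p]? = none) :
    ∀ (d : List (String × Int)) (m : List (List Int)),
      (d.foldl (fun m q => ((pvRows elements).getD q.1 []).foldl (fun m i => m.modify i.toNat (fun row => row.set jn (s * q.2))) m) m)[p]?
      = m[p]? := by
  intro d
  induction d with
  | nil => intro m; rfl
  | cons q d ih =>
      intro m
      simp only [List.foldl_cons]
      rw [ih]
      rw [pv_ixsfold _ _ (by intro r; simp) m p]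
      rw [if_neg (by intro hx; rw [(pv_rows_mem elements q.1 p).mp hx] at he; simp at he)]

theorem pv_colfold_some (elements : List String) (jn : Nat) (s : Int) (p : Nat) (e : String)
    (he : elements[p]? = some e) :
    ∀ (d : List (String × Int)), (d.map Prod.fst).Nodup → ∀ (m : List (List Int)),
      (d.foldl (fun m q => ((pvRows elements).getD q.1 []).foldl (fun m i => m.modify i.toNat (fun row => row.set jn (s * q.2))) m) m)[p]?
      = match (PySem.Dict.mk d).get? e with
        | some c => (m[p]?).map (fun row => row.set jn (s * c))
        | none => m[p]? := by
  intro d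
  induction d with
  | nil => intro _ m; rfl
  | cons q d ih =>
      intro hnd m
      simp only [List.map_cons, List.nodup_cons] at hnd
      obtain ⟨hq, hd⟩ := hnd
      have hm' : (((pvRows elements).getD q.1 []).foldl (fun m i => m.modify i.toNat (fun row => row.set jn (s * q.2))) m)[p]?
          = if elements[p]? = some q.1 then (m[p]?).map (fun row => row.set jn (s * q.2)) else m[p]? := by
        rw [pv_ixsfold _ _ (by intro r; simp) m p]
        by_cases hc : elements[p]? = some q.1
        · rw [if_pos ((pv_rows_mem elements q.1 p).mpr hc), if_pos hc]
        · rw [if_neg (fun hx => hc ((pv_rows_mem elements q.1 p).mp hx)), if_neg hc]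
      simp only [List.foldl_cons]
      rw [ih hd]
      by_cases hqe : q.1 = e
      · have hR : (PySem.Dict.mk (q :: d)).get? e = some q.2 := by
          rw [PySem.Dict.get?_mk_cons]
          simp [hqe]
        rw [hR, pv_get?_mk_none d e (hqe ▸ hq)]
        rw [if_pos (by rw [he, hqe])] at hm'
        exact hm'
      · have hR : (PySem.Dict.mk (q :: d)).get? e = (PySem.Dict.mk d).get? e := by
          rw [PySem.Dict.get?_mk_cons]
          simp [hqe]
        rw [hR]
        rw [if_neg (by rw [he]; exact fun hx => hqe (Option.some.inj hx).symm)] at hm'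
        cases hg : (PySem.Dict.mk d).get? e with
        | some c => exact congrArg (Option.map fun row => row.set jn (s * c)) hm'
        | none => exact hm'

-- B's per-row column update, as seen by one row holding element e
def pvStepB (lft whole : Nat) (e : String) (row : List Int) (pr : Int × List (String × Int)) : List Int :=
  match (PySem.Dict.mk pr.2).get? e with
  | some c => row.set pr.1.toNat ((if pr.1 < (lft : Int) ∨ pr.1 = (whole : Int) - 1 then (1 : Int) else -1) * c)
  | none => row

theorem pv_colsfold_none (lft whole : Nat) (elements : List String) (p : Nat)
    (he : elements[p]? = none) :
    ∀ (l : List (Int × List (String × Int))) (m : List (List Int)),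
      (l.foldl (fun m pr => pr.2.foldl (fun m q => ((pvRows elements).getD q.1 []).foldl (fun m i => m.modify i.toNat (fun row => row.set pr.1.toNat ((if pr.1 < (lft : Int) ∨ pr.1 = (whole : Int) - 1 then (1 : Int) else -1) * q.2))) m) m) m)[p]?
      = m[p]? := by
  intro l
  induction l with
  | nil => intro m; rfl
  | cons pr l ih =>
      intro m
      simp only [List.foldl_cons]
      rw [ih, pv_colfold_none elements pr.1.toNat _ p he]

theorem pv_colsfold_some (lft whole : Nat) (elements : List String) (p : Nat) (e : String)
    (he : elements[p]? = some e) :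
    ∀ (l : List (Int × List (String × Int))), (∀ pr ∈ l, (pr.2.map Prod.fst).Nodup) → ∀ (m : List (List Int)),
      (l.foldl (fun m pr => pr.2.foldl (fun m q => ((pvRows elements).getD q.1 []).foldl (fun m i => m.modify i.toNat (fun row => row.set pr.1.toNat ((if pr.1 < (lft : Int) ∨ pr.1 = (whole : Int) - 1 then (1 : Int) else -1) * q.2))) m) m) m)[p]?
      = (m[p]?).map (fun row => l.foldl (pvStepB lft whole e) row) := by
  intro l
  induction l with
  | nil =>
      intro _ m
      simp only [List.foldl_nil]
      cases m[p]? <;> rfl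
  | cons pr l ih =>
      intro hnd m
      simp only [List.foldl_cons]
      rw [ih (fun x hx => hnd x (List.mem_cons_of_mem _ hx))]
      have hcol := pv_colfold_some elements pr.1.toNat ((if pr.1 < (lft : Int) ∨ pr.1 = (whole : Int) - 1 then (1 : Int) else -1)) p e he pr.2 (hnd pr (List.mem_cons_self ..))
      cases hg : (PySem.Dict.mk pr.2).get? e with
      | some c =>
          rw [hg] at hcol
          rw [hcol m, Option.map_map]
          cases m[p]? with
          | none => rfl
          | some row =>
              simp only [Option.map_some, Function.comp]
              congr 1
              simp only [pvStepB, hg]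
      | none =>
          rw [hg] at hcol
          rw [hcol m]
          cases m[p]? with
          | none => rfl
          | some row =>
              simp only [Option.map_some]
              congr 1
              simp only [pvStepB, hg]

theorem pv_stepB_length (lft whole : Nat) (e : String) (row : List Int) (pr : Int × List (String × Int)) :
    (pvStepB lft whole e row pr).length = row.length := by
  cases hg : (PySem.Dict.mk pr.2).get? e with
  | some c => simp only [pvStepB, hg, List.length_set]
  | none => simp only [pvStepB, hg]

theorem pv_rowB (lft whole : Nat) (e : String) :
    ∀ (es : List (List (String × Int))) (j0 : Nat) (row : List Int), row.length = whole → j0 + es.length ≤ whole → ∀ (k : Nat),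
      ((PySem.List.enumerate es (j0 : Int)).foldl (pvStepB lft whole e) row)[k]?
      = if j0 ≤ k ∧ k < j0 + es.length
        then (row[k]?).map (fun old => match (PySem.Dict.mk (es.getD (k - j0) [])).get? e with
            | some c => (if (k : Int) < (lft : Int) ∨ (k : Int) = (whole : Int) - 1 then (1 : Int) else -1) * c
            | none => old)
        else row[k]? := by
  intro es
  induction es with
  | nil =>
      intro j0 row _ _ k
      rw [if_neg (by simp)]
      rfl
  | cons d rest ih =>
      intro j0 row hlenr hbound k
      rw [PySem.List.enumerate_cons]
      simp only [List.foldl_cons]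
      have hlc : (d :: rest).length = rest.length + 1 := by simp
      have hj0w : j0 < whole := by omega
      have hrow' : (pvStepB lft whole e row ((j0 : Int), d)).length = whole := by
        rw [pv_stepB_length]; exact hlenr
      have hcast : (j0 : Int) + 1 = ((j0 + 1 : Nat) : Int) := by push_cast; ring
      rw [hcast, ih (j0 + 1) _ hrow' (by omega) k]
      have htn : ((j0 : Int)).toNat = j0 := Int.toNat_natCast j0
      have hrowk_ne : j0 ≠ k → (pvStepB lft whole e row ((j0 : Int), d))[k]? = row[k]? := by
        intro hne
        cases hg : (PySem.Dict.mk d).get? e with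
        | some c =>
            simp only [pvStepB, hg, htn]
            rw [List.getElem?_set, if_neg hne]
        | none => simp only [pvStepB, hg]
      rcases Nat.lt_trichotomy k j0 with h | h | h
      · have hC1 : ¬ (j0 + 1 ≤ k ∧ k < (j0 + 1) + rest.length) := by omega
        have hC2 : ¬ (j0 ≤ k ∧ k < j0 + (d :: rest).length) := by omega
        rw [if_neg hC1, if_neg hC2]
        exact hrowk_ne (by omega)
      · subst h
        have hC1 : ¬ (k + 1 ≤ k ∧ k < (k + 1) + rest.length) := by omega
        have hC2 : k ≤ k ∧ k < k + (d :: rest).length := by omega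
        rw [if_neg hC1, if_pos hC2]
        have hget : (d :: rest).getD (k - k) [] = d := by simp
        rw [hget]
        have hrk : row[k]? = some row[k] := List.getElem?_eq_getElem (by omega)
        rw [hrk]
        cases hg : (PySem.Dict.mk d).get? e with
        | some c =>
            simp only [pvStepB, hg, htn]
            rw [List.getElem?_set, if_pos rfl, if_pos (by omega)]
            rfl
        | none =>
            simp only [pvStepB, hg]
            rw [hrk]
            rfl
      · have hget : (d :: rest).getD (k - j0) [] = rest.getD (k - (j0 + 1)) [] := by
          have h1 : k - j0 = (k - (j0 + 1)) + 1 := by omega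
          rw [h1, List.getD_cons_succ]
        by_cases hw : k < j0 + (d :: rest).length
        · have hC1 : j0 + 1 ≤ k ∧ k < (j0 + 1) + rest.length := by omega
          have hC2 : j0 ≤ k ∧ k < j0 + (d :: rest).length := by omega
          rw [if_pos hC1, if_pos hC2, hget, hrowk_ne (by omega)]
        · have hC1 : ¬ (j0 + 1 ≤ k ∧ k < (j0 + 1) + rest.length) := by omega
          have hC2 : ¬ (j0 ≤ k ∧ k < j0 + (d :: rest).length) := by omega
          rw [if_neg hC1, if_neg hC2]
          exact hrowk_ne (by omega)

theorem pv_rowB_eq (lft : Nat) (eqtion : List (List (String × Int))) (e : String) :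
    (PySem.List.enumerate eqtion ((0 : Nat) : Int)).foldl (pvStepB lft eqtion.length e) (List.replicate eqtion.length (0 : Int))
    = (List.range eqtion.length).map (pvCell lft eqtion.length eqtion e) := by
  apply List.ext_getElem?
  intro k
  rw [pv_rowB lft eqtion.length e eqtion 0 _ (by simp) (by simp) k]
  by_cases h : k < eqtion.length
  · rw [if_pos (by omega)]
    rw [List.getElem?_replicate, if_pos h]
    simp only [List.getElem?_map, List.getElem?_range, h, Option.map_some, Nat.sub_zero, if_pos h]
    simp only [Option.some.injEq]
    cases hg : (PySem.Dict.mk (eqtion.getD k [])).get? e with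
    | some c =>
        simp only [pvCell, hg]
        have hcond : ((k : Int) < (lft : Int) ∨ (k : Int) = (eqtion.length : Int) - 1) ↔ (k < lft ∨ k = eqtion.length - 1) := by
          omega
        by_cases hc : k < lft ∨ k = eqtion.length - 1
        · rw [if_pos (hcond.mpr hc), if_pos hc]
          ring
        · rw [if_neg (fun hx => hc (hcond.mp hx)), if_neg hc]
    | none => simp only [pvCell, hg]
  · rw [if_neg (by omega), List.getElem?_replicate, if_neg h]
    symm
    rw [List.getElem?_eq_none_iff]
    simp
    omega

theorem pv_B_eq_spec (lft_half_dt rgt_half_dt : List (List (String × Int))) (elements : List String) (eqtion : List (List (String × Int)))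
    (hpre : ∀ d ∈ eqtion, (d.map Prod.fst).Nodup) :
    create_matrix_equation_alt lft_half_dt rgt_half_dt elements eqtion
    = pvSpecM lft_half_dt.length elements eqtion := by
  have hB : create_matrix_equation_alt lft_half_dt rgt_half_dt elements eqtion
      = (PySem.List.enumerate eqtion 0).foldl (fun m pr => pr.2.foldl (fun m q => ((pvRows elements).getD q.1 []).foldl (fun m i => m.modify i.toNat (fun row => row.set pr.1.toNat ((if pr.1 < (lft_half_dt.length : Int) ∨ pr.1 = (eqtion.length : Int) - 1 then (1 : Int) else -1) * q.2))) m) m)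
          ((List.range elements.length).map (fun _ => List.replicate eqtion.length (0 : Int))) := rfl
  rw [hB]
  have hnd : ∀ pr ∈ PySem.List.enumerate eqtion 0, (pr.2.map Prod.fst).Nodup := by
    intro pr hpr
    rcases (PySem.List.mem_enumerate_iff eqtion 0 pr).mp hpr with ⟨k, hk, rfl⟩
    exact hpre _ (List.getElem_mem hk)
  apply List.ext_getElem?
  intro p
  by_cases h : p < elements.length
  · have he : elements[p]? = some elements[p] := List.getElem?_eq_getElem h
    rw [pv_colsfold_some lft_half_dt.length eqtion.length elements p elements[p] he _ hnd]
    have hm0 : ((List.range elements.length).map (fun _ => List.replicate eqtion.length (0 : Int)))[p]?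
        = some (List.replicate eqtion.length (0 : Int)) := by
      simp [List.getElem?_map, List.getElem?_range, h]
    rw [hm0]
    simp only [Option.map_some]
    rw [show PySem.List.enumerate eqtion (0 : Int) = PySem.List.enumerate eqtion ((0 : Nat) : Int) from rfl,
      pv_rowB_eq lft_half_dt.length eqtion elements[p]]
    simp [pvSpecM, List.getElem?_map, he]
  · rw [pv_colsfold_none lft_half_dt.length eqtion.length elements p (by rw [List.getElem?_eq_none_iff]; omega)]
    have h1 : ((List.range elements.length).map (fun _ => List.replicate eqtion.length (0 : Int)))[p]? = none := by
      simp [List.getElem?_map, List.getElem?_range, h]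
    rw [h1]
    symm
    simp [pvSpecM, List.getElem?_map]
    omega

theorem create_matrix_equation_spec : Claim_equal_create_matrix_equation := by
  intro lft_half_dt rgt_half_dt elements eqtion _ hpre
  unfold Spec_create_matrix_equation
  rw [pv_A_eq_spec, pv_B_eq_spec lft_half_dt rgt_half_dt elements eqtion hpre]
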